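-- pv_equiv track=rewrite | github.com/DrAlgoStrange/PythonFiles | Exercises/ransomenode_magazine.py | check_maker
-- ===== SOURCE A (Python) =====
-- def check_maker(base_str: str, target_str: str) -> bool:
--     letter_dict={}
--     for i in base_str:
--         if i in letter_dict:
--             letter_dict[i]+=1
--         else:
--             letter_dict[i]=1
--
--     for j in target_str:
--         if j in letter_dict:
--             if letter_dict[j]>1:
--                 letter_dict[j]-=1
--             else:
--                 del letter_dict[j]
--         else:
--             return False
--     return True
-- ===== SOURCE B (Python) =====
-- def check_maker(base_str: str, target_str: str) -> bool:
--     return all(target_str.count(ch) <= base_str.count(ch) for ch in set(target_str))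
-- ===== Notes on version B (the rewrite author's own statement) =====
-- stated objective: simpler
-- what changed: Replaces A's streaming decrement-and-delete dict loop with early exit by a one-line whole-string comparison: for each distinct target character, compare full occurrence counts in target and base via str.count (C-level counting instead of a per-character Python loop).
import Mathlib
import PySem

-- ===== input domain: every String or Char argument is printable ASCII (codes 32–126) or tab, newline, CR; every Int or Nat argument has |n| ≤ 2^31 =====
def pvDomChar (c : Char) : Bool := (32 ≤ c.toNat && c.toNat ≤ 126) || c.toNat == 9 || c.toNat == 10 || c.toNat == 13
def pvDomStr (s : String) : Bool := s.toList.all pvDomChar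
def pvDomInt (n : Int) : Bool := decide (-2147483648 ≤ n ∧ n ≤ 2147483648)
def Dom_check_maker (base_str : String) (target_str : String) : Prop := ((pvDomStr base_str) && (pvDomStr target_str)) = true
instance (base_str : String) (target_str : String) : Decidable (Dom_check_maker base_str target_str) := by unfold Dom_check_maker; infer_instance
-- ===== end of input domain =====

-- B replaces A's streaming decrement-and-delete dict loop (with early exit) by a one-line
-- per-distinct-character comparison of full occurrence counts; objective: simpler.

-- ===== PORT A =====
-- the second Python loop of A: consume target chars against the letter dict, early False
def pvLoopA : List Char → PySem.Dict Char Int → Bool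
  | [], _ => true
  | j :: rest, d =>
    if d.contains j then
      if d.getD j 0 > 1 then pvLoopA rest (d.insert j (d.getD j 0 - 1))
      else pvLoopA rest (d.erase j)
    else false

def check_maker (base_str : String) (target_str : String) : Bool :=
  let letter_dict : PySem.Dict Char Int :=
    base_str.toList.foldl
      (fun d i => if d.contains i then d.insert i (d.getD i 0 + 1) else d.insert i 1)
      PySem.Dict.empty
  pvLoopA target_str.toList letter_dict

-- ===== PORT B =====
-- Source B: all(target_str.count(ch) <= base_str.count(ch) for ch in set(target_str))
-- str.count with a single-character needle is exactly List.count on the chars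
def check_maker_alt (base_str : String) (target_str : String) : Bool :=
  (PySem.Set.ofList target_str.toList).all
    (fun ch => decide ((target_str.toList.count ch : Int) ≤ (base_str.toList.count ch : Int)))

-- ===== PRECONDITION & SPEC =====
def Spec_check_maker (base_str : String) (target_str : String) (out : Bool) : Prop := out = check_maker_alt base_str target_str
instance (base_str : String) (target_str : String) (out : Bool) : Decidable (Spec_check_maker base_str target_str out) := by unfold Spec_check_maker; infer_instance

-- ===== CLAIM (what is proved, stated in full; the proofs are below) =====
def Claim_equal_check_maker : Prop := ∀ (base_str : String) (target_str : String), Dom_check_maker base_str target_str → Spec_check_maker base_str target_str (check_maker base_str target_str)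

-- ===== LEMMAS AND PROOFS =====

-- PySem ships no `erase` lemmas; these three are proved from its definition.
theorem pv_get?_erase {ν : Type} (d : PySem.Dict Char ν) (k k' : Char) :
    (d.erase k).get? k' = if k' = k then none else d.get? k' := by
  obtain ⟨l⟩ := d
  by_cases hk' : k' = k
  · subst hk'
    simp only [PySem.Dict.erase, PySem.Dict.get?]
    simp only [if_true]
    rw [List.find?_eq_none.mpr]
    · rfl
    · intro x hx
      have := (List.mem_filter.mp hx).2
      simpa using this
  · simp only [PySem.Dict.erase, PySem.Dict.get?, if_neg hk']
    congr 1
    induction l with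
    | nil => simp
    | cons p rest ih =>
      rw [List.filter_cons]
      by_cases hp : p.1 = k
      · have hkk : (k == k') = false := beq_eq_false_iff_ne.mpr (fun h => hk' h.symm)
        simp [hp, hkk, ih]
      · by_cases hq : p.1 = k'
        · simp [hq, hk']
        · simp [hp, hq, ih]

theorem pv_getD_erase (d : PySem.Dict Char Int) (k k' : Char) (v0 : Int) :
    (d.erase k).getD k' v0 = if k' = k then v0 else d.getD k' v0 := by
  rw [PySem.Dict.getD_eq_get?_getD, pv_get?_erase, PySem.Dict.getD_eq_get?_getD]
  split <;> rfl

theorem pv_contains_erase (d : PySem.Dict Char Int) (k k' : Char) :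
    (d.erase k).contains k' = (decide (k' ≠ k) && d.contains k') := by
  rw [PySem.Dict.contains_eq_isSome_get?, pv_get?_erase]
  by_cases h : k' = k
  · simp [h]
  · simp [h, PySem.Dict.contains_eq_isSome_get?]

-- peeling one consumed character off the per-character count bound
theorem pv_shift (j : Char) (rest : List Char) (f g : Char → Int)
    (hj : ∀ x : Int, x ≤ f j ↔ x + 1 ≤ g j)
    (hne : ∀ c, c ≠ j → f c = g c) :
    (∀ c : Char, (rest.count c : Int) ≤ f c) ↔
      (∀ c : Char, ((j :: rest).count c : Int) ≤ g c) := by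
  constructor <;> intro H c <;> have hH := H c
  · by_cases hcj : c = j
    · subst hcj
      rw [List.count_cons_self]
      push_cast
      exact (hj _).mp hH
    · have hcj' : ¬ j = c := fun h => hcj h.symm
      rw [hne c hcj] at hH
      simpa [List.count_cons, hcj'] using hH
  · by_cases hcj : c = j
    · subst hcj
      rw [List.count_cons_self] at hH
      push_cast at hH
      exact (hj _).mpr hH
    · have hcj' : ¬ j = c := fun h => hcj h.symm
      rw [hne c hcj]
      simpa [List.count_cons, hcj'] using hH

-- characterisation of A's consuming loop on a positive-valued dict
theorem pvLoopA_eq (t : List Char) (d : PySem.Dict Char Int)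
    (h : ∀ c : Char, d.contains c = true → 0 < d.getD c 0) :
    pvLoopA t d = decide (∀ c : Char, (t.count c : Int) ≤ d.getD c 0) := by
  induction t generalizing d with
  | nil =>
    simp only [pvLoopA]
    symm
    rw [decide_eq_true_eq]
    intro c
    by_cases hc : d.contains c = true
    · have := le_of_lt (h c hc)
      simpa using this
    · rw [PySem.Dict.getD_of_not_contains _ _ (by simpa using hc)]
      simp
  | cons j rest ih =>
    by_cases hc : d.contains j = true
    · have hv : 0 < d.getD j 0 := h j hc
      by_cases h1 : d.getD j 0 > 1
      · have hinv : ∀ c : Char, (d.insert j (d.getD j 0 - 1)).contains c = true →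
            0 < (d.insert j (d.getD j 0 - 1)).getD c 0 := by
          intro c hcc
          rw [PySem.Dict.getD_insert]
          by_cases hcj : c = j
          · rw [if_pos hcj]; omega
          · rw [if_neg hcj]
            apply h
            rw [PySem.Dict.contains_insert] at hcc
            simpa [hcj] using hcc
        rw [pvLoopA, if_pos hc, if_pos h1, ih _ hinv]
        rw [decide_eq_decide]
        apply pv_shift
        · intro x
          rw [PySem.Dict.getD_insert_self]
          omega
        · intro c hcj
          rw [PySem.Dict.getD_insert, if_neg hcj]
      · have hinv : ∀ c : Char, (d.erase j).contains c = true →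
            0 < (d.erase j).getD c 0 := by
          intro c hcc
          rw [pv_contains_erase] at hcc
          rw [pv_getD_erase]
          simp only [Bool.and_eq_true, decide_eq_true_eq] at hcc
          rw [if_neg hcc.1]
          exact h c hcc.2
        rw [pvLoopA, if_pos hc, if_neg h1, ih _ hinv]
        rw [decide_eq_decide]
        apply pv_shift
        · intro x
          rw [pv_getD_erase, if_pos rfl]
          omega
        · intro c hcj
          rw [pv_getD_erase, if_neg hcj]
    · rw [pvLoopA, if_neg hc]
      symm
      rw [decide_eq_false_iff_not]
      intro H
      have hj := H j
      rw [PySem.Dict.getD_of_not_contains _ _ (by simpa using hc)] at hj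
      rw [List.count_cons_self] at hj
      push_cast at hj
      omega

-- A's building loop is Counter(base_str)
theorem pv_build_eq_counter (bl : List Char) :
    bl.foldl (fun d i => if d.contains i then d.insert i (d.getD i 0 + 1) else d.insert i 1)
      PySem.Dict.empty = PySem.Dict.counter bl := by
  have hstep : (fun (d : PySem.Dict Char Int) (i : Char) =>
      if d.contains i then d.insert i (d.getD i 0 + 1) else d.insert i 1)
      = (fun d i => d.insert i (d.getD i 0 + 1)) := by
    funext d i
    by_cases h : d.contains i = true
    · simp [h]
    · rw [if_neg h, PySem.Dict.getD_of_not_contains _ _ (by simpa using h)]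
      norm_num
  rw [hstep, PySem.Dict.foldl_insert_getD_add_one_eq_counter]

theorem pvA_char (b t : String) :
    check_maker b t
      = decide (∀ c : Char, (t.toList.count c : Int) ≤ (b.toList.count c : Int)) := by
  unfold check_maker
  rw [pv_build_eq_counter]
  rw [pvLoopA_eq]
  · rw [decide_eq_decide]
    constructor <;> intro H c <;> have := H c <;>
      simpa [PySem.Dict.getD_counter] using this
  · intro c hc
    rw [PySem.Dict.getD_counter]
    rw [PySem.Dict.contains_counter] at hc
    have hm : c ∈ b.toList := by simpa using hc
    have := List.count_pos_iff.mpr hm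
    omega

theorem pvB_char (b t : String) :
    check_maker_alt b t
      = decide (∀ c : Char, (t.toList.count c : Int) ≤ (b.toList.count c : Int)) := by
  rw [Bool.eq_iff_iff, decide_eq_true_eq]
  unfold check_maker_alt
  rw [List.all_eq_true]
  constructor
  · intro H c
    by_cases hm : c ∈ t.toList
    · have := H c (by rwa [PySem.Set.mem_ofList])
      simpa using this
    · rw [List.count_eq_zero_of_not_mem hm]
      positivity
  · intro H c _
    simpa using H c

-- ===== VERDICT (by name: the statement is the Claim_ definition above) =====
theorem check_maker_spec : Claim_equal_check_maker := by
  intro b t _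
  unfold Spec_check_maker
  rw [pvA_char, pvB_char]
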